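-- pv_equiv track=rewrite | github.com/dungquixote42/ec602 | hw1/hw1_numbers.py | heavy
-- ===== SOURCE A (Python) =====
-- def heavy(int_y, int_N):
--
--     list_prev = [int_y]
--
--     while(1):
--         int_next = 0
--         while(int_y > 0):
--             int_next += (int_y % int_N)**2
--             int_y = int_y // int_N
--         if(int_next == 1):
--             return True
--         elif int_next in list_prev:
--             return False
--         else:
--             list_prev.append(int_next)
--             int_y = int_next
-- ===== SOURCE B (Python) =====
-- def heavy(int_y, int_N):
--     # Floyd tortoise-and-hare cycle detection: no history list, O(1) memory,
--     # and no O(t) membership scan per iteration.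
--     def step(n):
--         total = 0
--         while n > 0:
--             total += (n % int_N) ** 2
--             n //= int_N
--         return total
--     slow = step(int_y)
--     fast = step(step(int_y))
--     while slow != fast:
--         slow = step(slow)
--         fast = step(step(fast))
--     return slow == 1
-- ===== Notes on version B (the rewrite author's own statement) =====
-- stated objective: faster
-- what changed: Replaced A's ever-growing history list and its O(t) membership scan per iteration by Floyd's tortoise-and-hare cycle detection (two advancing pointers, no history); Pre_ excludes int_y>0 with int_N<=1 (A raises or diverges) and with negative int_N, a nonsensical base on which no result is specified and the two detection schemes can defensibly differ (they agree on most such inputs).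
-- outside the precondition, e.g. on heavy(2, -5): A returns True, B returns False; on heavy(3, -4): A returns True, B returns False
import Mathlib
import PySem

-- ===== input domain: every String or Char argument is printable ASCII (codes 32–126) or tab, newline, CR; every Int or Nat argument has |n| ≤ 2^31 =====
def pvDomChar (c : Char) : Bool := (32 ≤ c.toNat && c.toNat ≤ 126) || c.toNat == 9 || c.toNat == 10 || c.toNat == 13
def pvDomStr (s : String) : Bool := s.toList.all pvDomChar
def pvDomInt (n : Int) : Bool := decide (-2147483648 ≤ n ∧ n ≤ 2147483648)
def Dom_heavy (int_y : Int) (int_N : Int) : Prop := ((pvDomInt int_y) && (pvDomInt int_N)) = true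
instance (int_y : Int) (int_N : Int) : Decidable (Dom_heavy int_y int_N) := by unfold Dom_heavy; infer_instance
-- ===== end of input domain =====

-- B replaces A's history list (with an O(t) membership scan per loop iteration) by Floyd's
-- tortoise-and-hare cycle detection: two advancing pointers, O(1) memory.

-- ===== PORT A =====
-- A's inner digit loop `while int_y > 0: int_next += (int_y % int_N)**2; int_y //= int_N`.
-- The `2 ≤ int_N` conjunct in the guard only makes the recursion total (within Pre_heavy the
-- loop body is only ever entered when 2 ≤ int_N, where the guard is exactly `0 < y`).
def heavyInner (int_N : Int) (y : Int) (acc : Int) : Int :=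
  if h : 0 < y ∧ 2 ≤ int_N then
    heavyInner int_N (PySem.Int.floordiv y int_N) (acc + (PySem.Int.mod y int_N) ^ 2)
  else acc
termination_by y.toNat
decreasing_by
  have h1 : PySem.Int.floordiv y int_N = y / int_N :=
    PySem.Int.floordiv_eq_ediv_of_pos (by omega)
  have h2 : y / int_N < y := by
    rw [Int.ediv_lt_iff_lt_mul (by omega)]; nlinarith [h.1, h.2]
  simp only [h1]; omega

-- fuel for A's `while(1)` loop: provably sufficient within Pre_heavy (the appended orbit values
-- are pairwise distinct and lie in [0, 64(int_N-1)^2+1), see the lemmas below); the fuel only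
-- makes the recursion total and is never exhausted on inputs satisfying Pre_heavy.
def heavyBoundM (int_N : Int) : Nat := (64 * (int_N - 1) ^ 2 + 1).toNat

def heavyLoop (int_N : Int) : Nat → Int → List Int → Bool
  | 0, _, _ => false
  | fuel + 1, int_y, list_prev =>
    let int_next := heavyInner int_N int_y 0
    if int_next = 1 then true
    else if int_next ∈ list_prev then false
    else heavyLoop int_N fuel int_next (list_prev ++ [int_next])

def heavy (int_y : Int) (int_N : Int) : Bool :=
  heavyLoop int_N (heavyBoundM int_N + 2) int_y [int_y]

-- ===== PORT B =====
-- Source B's helper `step(n)`: the same digit-loop shape (again, `2 ≤ int_N` in the guard only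
-- for totality).
def stepLoop (int_N : Int) (n : Int) (total : Int) : Int :=
  if h : 0 < n ∧ 2 ≤ int_N then
    stepLoop int_N (PySem.Int.floordiv n int_N) (total + (PySem.Int.mod n int_N) ^ 2)
  else total
termination_by n.toNat
decreasing_by
  have h1 : PySem.Int.floordiv n int_N = n / int_N :=
    PySem.Int.floordiv_eq_ediv_of_pos (by omega)
  have h2 : n / int_N < n := by
    rw [Int.ediv_lt_iff_lt_mul (by omega)]; nlinarith [h.1, h.2]
  simp only [h1]; omega

def step (int_N : Int) (n : Int) : Int := stepLoop int_N n 0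

-- Source B's `while slow != fast` loop; the fuel is provably larger than the first meeting index
-- of the tortoise and the hare on inputs satisfying Pre_heavy.
def floydLoop (int_N : Int) : Nat → Int → Int → Bool
  | 0, _, _ => false
  | fuel + 1, slow, fast =>
    if slow ≠ fast then
      floydLoop int_N fuel (step int_N slow) (step int_N (step int_N fast))
    else decide (slow = 1)

def heavy_alt (int_y : Int) (int_N : Int) : Bool :=
  floydLoop int_N ((heavyBoundM int_N + 2) * (heavyBoundM int_N + 2))
    (step int_N int_y) (step int_N (step int_N int_y))

-- ===== PRECONDITION & SPEC =====
-- Pre_heavy excludes exactly the inputs with int_y > 0 and int_N ≤ 1: there A raises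
-- ZeroDivisionError (int_N = 0) or loops forever (int_N = 1), and for a negative base
-- int_N ≤ -1 — a nonsensical base for the happy-number recursion, on which 1 is not a fixed
-- point of the digit-square-sum map, so no result is specified — A's history test and B's
-- cycle detection can return different (equally defensible) answers, e.g. at (2, -5) A
-- returns True and B returns False (on most negative-base inputs they still agree).
def Pre_heavy (int_y : Int) (int_N : Int) : Prop := 2 ≤ int_N ∨ int_y ≤ 0
instance (int_y : Int) (int_N : Int) : Decidable (Pre_heavy int_y int_N) := by
  unfold Pre_heavy; infer_instance

def pvWitness_heavy : Int × Int := (7, 10)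

def Spec_heavy (int_y : Int) (int_N : Int) (out : Bool) : Prop := out = heavy_alt int_y int_N
instance (int_y : Int) (int_N : Int) (out : Bool) : Decidable (Spec_heavy int_y int_N out) := by
  unfold Spec_heavy; infer_instance

-- ===== CLAIM (what is proved, stated in full; the proofs are below) =====
def Claim_equal_heavy : Prop := ∀ (int_y : Int) (int_N : Int), Dom_heavy int_y int_N →
  Pre_heavy int_y int_N → Spec_heavy int_y int_N (heavy int_y int_N)

-- ===== LEMMAS AND PROOFS =====

-- the orbit of int_y under A's digit-square-sum map (index 0 = int_y itself)
def orbit (int_N : Int) (int_y : Int) : Nat → Int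
  | 0 => int_y
  | k + 1 => heavyInner int_N (orbit int_N int_y k) 0

theorem stepLoop_eq_heavyInner (int_N n total : Int) :
    stepLoop int_N n total = heavyInner int_N n total := by
  fun_induction stepLoop with
  | case1 n total h ih => rw [heavyInner, dif_pos h, ih]
  | case2 n total h => rw [heavyInner, dif_neg h]

theorem heavyInner_acc (int_N y acc : Int) :
    heavyInner int_N y acc = acc + heavyInner int_N y 0 := by
  by_cases h : 0 < y ∧ 2 ≤ int_N
  · conv_lhs => rw [heavyInner]
    conv_rhs => rw [heavyInner]
    rw [dif_pos h]
    rw [heavyInner_acc int_N (PySem.Int.floordiv y int_N) (acc + (PySem.Int.mod y int_N) ^ 2),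
        heavyInner_acc int_N (PySem.Int.floordiv y int_N) (0 + (PySem.Int.mod y int_N) ^ 2)]
    rw [dif_pos h]
    ring
  · conv_lhs => rw [heavyInner]
    conv_rhs => rw [heavyInner]
    simp [h]
termination_by y.toNat
decreasing_by
  all_goals
    have h1 : PySem.Int.floordiv y int_N = y / int_N :=
      PySem.Int.floordiv_eq_ediv_of_pos (by omega)
    have h2 : y / int_N < y := by
      rw [Int.ediv_lt_iff_lt_mul (by omega)]; nlinarith [h.1, h.2]
    simp only [h1]; omega

theorem heavyInner_nonneg (int_N y : Int) : 0 ≤ heavyInner int_N y 0 := by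
  by_cases h : 0 < y ∧ 2 ≤ int_N
  · rw [heavyInner]
    rw [dif_pos h]
    rw [heavyInner_acc]
    have h1 := heavyInner_nonneg int_N (PySem.Int.floordiv y int_N)
    have h2 := sq_nonneg (PySem.Int.mod y int_N)
    linarith
  · rw [heavyInner]; simp [h]
termination_by y.toNat
decreasing_by
  have h1 : PySem.Int.floordiv y int_N = y / int_N :=
    PySem.Int.floordiv_eq_ediv_of_pos (by omega)
  have h2 : y / int_N < y := by
    rw [Int.ediv_lt_iff_lt_mul (by omega)]; nlinarith [h.1, h.2]
  simp only [h1]; omega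

theorem heavyInner_one (int_N : Int) (hN : 2 ≤ int_N) : heavyInner int_N 1 0 = 1 := by
  have hm : PySem.Int.mod 1 int_N = 1 := by
    rw [PySem.Int.mod_eq_emod_of_pos (by omega)]
    exact Int.emod_eq_of_lt (by omega) (by omega)
  have hd : PySem.Int.floordiv 1 int_N = 0 := by
    rw [PySem.Int.floordiv_eq_ediv_of_pos (by omega)]
    exact Int.ediv_eq_zero_of_lt (by omega) (by omega)
  rw [heavyInner]
  rw [dif_pos (⟨by norm_num, hN⟩ : (0:Int) < 1 ∧ 2 ≤ int_N), hm, hd]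
  rw [heavyInner]
  norm_num

theorem heavyInner_bound (int_N : Int) (hN : 2 ≤ int_N) (k : Nat) :
    ∀ v : Int, 0 ≤ v → v < int_N ^ k → heavyInner int_N v 0 ≤ (k : Int) * (int_N - 1) ^ 2 := by
  induction k with
  | zero =>
      intro v hv0 hvk
      simp only [pow_zero] at hvk
      have : v = 0 := by omega
      subst this
      rw [heavyInner]; norm_num
  | succ k ih =>
      intro v hv0 hvk
      by_cases h : 0 < v ∧ 2 ≤ int_N
      · rw [heavyInner]
        rw [dif_pos h]
        rw [heavyInner_acc]
        have hmle : PySem.Int.mod v int_N ≤ int_N - 1 := by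
          have := PySem.Int.mod_lt v (b := int_N) (by omega); omega
        have hmge : 0 ≤ PySem.Int.mod v int_N := PySem.Int.mod_nonneg v (by omega)
        have hsq : (PySem.Int.mod v int_N) ^ 2 ≤ (int_N - 1) ^ 2 := by nlinarith
        have hdnn : 0 ≤ PySem.Int.floordiv v int_N := by
          rw [PySem.Int.floordiv_eq_ediv_of_pos (by omega)]
          exact Int.ediv_nonneg (by omega) (by omega)
        have hdlt : PySem.Int.floordiv v int_N < int_N ^ k := by
          rw [PySem.Int.floordiv_lt_iff_lt_mul (by omega)]
          calc v < int_N ^ (k+1) := hvk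
          _ = int_N ^ k * int_N := by ring
        have := ih (PySem.Int.floordiv v int_N) hdnn hdlt
        push_cast
        linarith
      · rw [heavyInner]
        rw [dif_neg h]
        positivity

theorem heavyInner_of_not_two_le (int_N y : Int) (h : ¬ 2 ≤ int_N) :
    heavyInner int_N y 0 = 0 := by
  rw [heavyInner, dif_neg (fun hh => h hh.2)]

theorem heavyInner_of_nonpos (int_N y : Int) (h : y ≤ 0) :
    heavyInner int_N y 0 = 0 := by
  rw [heavyInner, dif_neg (fun hh => absurd hh.1 (by omega))]

theorem pow_dom_bound (int_N : Int) (hN : 2 ≤ int_N) :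
    (2147483648 : Int) < int_N ^ 32 := by
  have h2 : (2:Int) ^ 32 ≤ int_N ^ 32 := pow_le_pow_left₀ (by norm_num) hN 32
  norm_num at h2 ⊢
  omega

theorem b_le_pow8 (int_N : Int) (hN : 2 ≤ int_N) :
    64 * (int_N - 1) ^ 2 + 1 ≤ int_N ^ 8 := by
  have h1 : (int_N - 1) ^ 2 < int_N ^ 2 := by nlinarith
  have h2 : (2:Int) ^ 6 ≤ int_N ^ 6 := pow_le_pow_left₀ (by norm_num) hN 6
  have h3 : (0:Int) < int_N ^ 2 := by positivity
  have h4 : int_N ^ 6 * int_N ^ 2 = int_N ^ 8 := by ring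
  nlinarith

theorem orbit_pos_bound (int_N int_y : Int) (hD : Dom_heavy int_y int_N)
    (_hP : Pre_heavy int_y int_N) (i : Nat) :
    0 ≤ orbit int_N int_y (i + 1) ∧
      orbit int_N int_y (i + 1) < 64 * (int_N - 1) ^ 2 + 1 := by
  have hsq : (0:Int) ≤ (int_N - 1) ^ 2 := sq_nonneg _
  by_cases hN : 2 ≤ int_N
  · induction i with
    | zero =>
        have hnn := heavyInner_nonneg int_N int_y
        refine ⟨hnn, ?_⟩
        by_cases hy : int_y ≤ 0
        · rw [show orbit int_N int_y 1 = heavyInner int_N int_y 0 from rfl,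
              heavyInner_of_nonpos int_N int_y hy]
          linarith
        · have hyD : int_y ≤ 2147483648 := by
            have : (pvDomInt int_y && pvDomInt int_N) = true := hD
            simp [pvDomInt] at this; omega
          have hlt : int_y < int_N ^ 32 := lt_of_le_of_lt hyD (pow_dom_bound int_N hN)
          have := heavyInner_bound int_N hN 32 int_y (by omega) hlt
          rw [show orbit int_N int_y 1 = heavyInner int_N int_y 0 from rfl]
          push_cast at this
          linarith
    | succ i ih =>
        have hnn := heavyInner_nonneg int_N (orbit int_N int_y (i + 1))
        refine ⟨hnn, ?_⟩
        obtain ⟨h0, hB⟩ := ih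
        have hlt : orbit int_N int_y (i + 1) < int_N ^ 8 :=
          lt_of_lt_of_le hB (b_le_pow8 int_N hN)
        have := heavyInner_bound int_N hN 8 (orbit int_N int_y (i + 1)) h0 hlt
        rw [show orbit int_N int_y (i + 2) =
              heavyInner int_N (orbit int_N int_y (i + 1)) 0 from rfl]
        push_cast at this
        linarith
  · have hz : ∀ j : Nat, orbit int_N int_y (j + 1) = 0 := by
      intro j
      rw [show orbit int_N int_y (j + 1) = heavyInner int_N (orbit int_N int_y j) 0 from rfl,
          heavyInner_of_not_two_le int_N _ hN]
    rw [hz i]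
    constructor <;> linarith

theorem orbit_succ (int_N int_y : Int) (k : Nat) :
    orbit int_N int_y (k + 1) = heavyInner int_N (orbit int_N int_y k) 0 := rfl

theorem orbit_add_period (int_N int_y : Int) (j p : Nat)
    (hp : orbit int_N int_y (j + p) = orbit int_N int_y j) :
    ∀ d, orbit int_N int_y (j + d + p) = orbit int_N int_y (j + d) := by
  intro d
  induction d with
  | zero => simpa using hp
  | succ d ih =>
      rw [show j + (d + 1) + p = (j + d + p) + 1 from by omega,
          show j + (d + 1) = (j + d) + 1 from by omega,
          orbit_succ, orbit_succ, ih]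

theorem orbit_add_mul_period (int_N int_y : Int) (j p : Nat)
    (hp : orbit int_N int_y (j + p) = orbit int_N int_y j) :
    ∀ c d, orbit int_N int_y (j + d + c * p) = orbit int_N int_y (j + d) := by
  intro c
  induction c with
  | zero => intro d; simp
  | succ c ih =>
      intro d
      rw [show (c + 1) * p = c * p + p from by ring]
      rw [show j + d + (c * p + p) = (j + (d + c * p)) + p from by omega]
      rw [show (j + (d + c * p)) + p = j + (d + c * p) + p from rfl]
      rw [orbit_add_period int_N int_y j p hp (d + c * p)]
      rw [show j + (d + c * p) = j + d + c * p from by omega]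
      exact ih d

theorem pigeonhole_orbit (int_N int_y : Int) (hD : Dom_heavy int_y int_N)
    (hP : Pre_heavy int_y int_N) :
    ∃ j l : Nat, 1 ≤ j ∧ j < l ∧ l ≤ heavyBoundM int_N + 1 ∧
      orbit int_N int_y j = orbit int_N int_y l := by
  have hB1 : (1:Int) ≤ 64 * (int_N - 1) ^ 2 + 1 := by nlinarith [sq_nonneg (int_N - 1)]
  have hmaps : ∀ i ∈ Finset.Icc 1 (heavyBoundM int_N + 1),
      orbit int_N int_y i ∈ Finset.Ico (0:Int) (64 * (int_N - 1) ^ 2 + 1) := by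
    intro i hi
    simp only [Finset.mem_Icc] at hi
    obtain ⟨h0, hB⟩ := orbit_pos_bound int_N int_y hD hP (i - 1)
    rw [show i - 1 + 1 = i from by omega] at h0 hB
    simp only [Finset.mem_Ico]
    exact ⟨h0, hB⟩
  have hcard : (Finset.Ico (0:Int) (64 * (int_N - 1) ^ 2 + 1)).card <
      (Finset.Icc 1 (heavyBoundM int_N + 1)).card := by
    rw [Int.card_Ico, Nat.card_Icc]
    simp only [heavyBoundM]
    omega
  obtain ⟨j, hj, l, hl, hne, heq⟩ :=
    Finset.exists_ne_map_eq_of_card_lt_of_maps_to hcard hmaps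
  simp only [Finset.mem_Icc] at hj hl
  rcases Nat.lt_or_ge j l with h | h
  · exact ⟨j, l, hj.1, h, hl.2, heq⟩
  · exact ⟨l, j, hl.1, by omega, hj.2, heq.symm⟩

theorem exists_meet (int_N int_y : Int) (hD : Dom_heavy int_y int_N)
    (hP : Pre_heavy int_y int_N) :
    ∃ n : Nat, (1 ≤ n ∧ orbit int_N int_y n = orbit int_N int_y (2 * n)) ∧
      n ≤ heavyBoundM int_N * heavyBoundM int_N := by
  obtain ⟨j, l, hj1, hjl, hlM, heq⟩ := pigeonhole_orbit int_N int_y hD hP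
  set p := l - j with hp
  have hp1 : 1 ≤ p := by omega
  have hper : orbit int_N int_y (j + p) = orbit int_N int_y j := by
    rw [show j + p = l from by omega]; exact heq.symm
  have hpM : p ≤ heavyBoundM int_N := by omega
  have hjM : j ≤ heavyBoundM int_N := by omega
  have hle : j ≤ p * j := Nat.le_mul_of_pos_left j hp1
  refine ⟨p * j, ⟨by omega, ?_⟩, Nat.mul_le_mul hpM hjM⟩
  have hmul := orbit_add_mul_period int_N int_y j p hper j (p * j - j)
  rw [show j + (p * j - j) = p * j from by omega] at hmul
  rw [show p * j + j * p = 2 * (p * j) from by rw [Nat.mul_comm j p]; omega] at hmul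
  exact hmul.symm

theorem step_orbit (int_N int_y : Int) (k : Nat) :
    step int_N (orbit int_N int_y k) = orbit int_N int_y (k + 1) := by
  rw [step, stepLoop_eq_heavyInner, orbit_succ]

theorem floydLoop_meet (int_N int_y : Int)
    (hex : ∃ n : Nat, 1 ≤ n ∧ orbit int_N int_y n = orbit int_N int_y (2 * n)) :
    ∀ (fuel i : Nat), 1 ≤ i → i ≤ Nat.find hex → Nat.find hex < fuel + i →
      floydLoop int_N fuel (orbit int_N int_y i) (orbit int_N int_y (2 * i)) =
        decide (orbit int_N int_y (Nat.find hex) = 1) := by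
  intro fuel
  induction fuel with
  | zero => intro i _ h1 h2; exfalso; omega
  | succ fuel ih =>
      intro i hi1 him hfuel
      rw [floydLoop]
      by_cases heq : orbit int_N int_y i = orbit int_N int_y (2 * i)
      · rw [if_neg (not_not_intro heq)]
        have hm : Nat.find hex = i :=
          Nat.le_antisymm (Nat.find_min' hex ⟨hi1, heq⟩) him
        rw [hm]
      · rw [if_pos heq]
        have hil : i < Nat.find hex := by
          rcases Nat.lt_or_ge i (Nat.find hex) with h | h
          · exact h
          · have : i = Nat.find hex := by omega
            subst this
            exact absurd (Nat.find_spec hex).2 heq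
        rw [step_orbit, step_orbit, step_orbit,
            show 2 * i + 1 + 1 = 2 * (i + 1) from by omega]
        exact ih (i + 1) (by omega) (by omega) (by omega)

theorem heavy_alt_iff (int_N int_y : Int) (hD : Dom_heavy int_y int_N)
    (hP : Pre_heavy int_y int_N) :
    heavy_alt int_y int_N = true ↔ ∃ k, 1 ≤ k ∧ orbit int_N int_y k = 1 := by
  obtain ⟨n0, hn0, hn0b⟩ := exists_meet int_N int_y hD hP
  have hex : ∃ n : Nat, 1 ≤ n ∧ orbit int_N int_y n = orbit int_N int_y (2 * n) := ⟨n0, hn0⟩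
  have hfind : Nat.find hex ≤ n0 := Nat.find_min' hex hn0
  have h1 : heavy_alt int_y int_N =
      decide (orbit int_N int_y (Nat.find hex) = 1) := by
    rw [heavy_alt,
        show step int_N int_y = orbit int_N int_y 1 from step_orbit int_N int_y 0,
        show step int_N (orbit int_N int_y 1) = orbit int_N int_y (2 * 1) from
          step_orbit int_N int_y 1]
    exact floydLoop_meet int_N int_y hex _ 1 (le_refl 1) (Nat.find_spec hex).1
      (by nlinarith [Nat.find_spec hex])
  rw [h1]
  simp only [decide_eq_true_eq]
  constructor
  · intro h
    exact ⟨Nat.find hex, (Nat.find_spec hex).1, h⟩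
  · rintro ⟨k, hk1, hk⟩
    by_cases hN : 2 ≤ int_N
    · -- 1 is a fixed point, so the orbit is eventually constantly 1
      have hfix : ∀ d, k ≤ d → orbit int_N int_y d = 1 := by
        intro d
        induction d with
        | zero => intro h; rw [show k = 0 from by omega] at hk; exact hk
        | succ d ihd =>
            intro h
            rcases Nat.lt_or_ge d k with h' | h'
            · rw [show d + 1 = k from by omega]; exact hk
            · rw [orbit_succ, ihd h', heavyInner_one int_N hN]
      set m := Nat.find hex with hm
      have hper : orbit int_N int_y (m + m) = orbit int_N int_y m := by
        have := (Nat.find_spec hex).2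
        rw [show 2 * m = m + m from by omega] at this
        exact this.symm
      have hmul := orbit_add_mul_period int_N int_y m m hper k 0
      rw [Nat.add_zero] at hmul
      have hm1 : 1 ≤ m := (Nat.find_spec hex).1
      rw [← hmul]
      exact hfix (m + k * m) (by nlinarith)
    · -- int_N < 2: every positive-index orbit value is 0, contradicting orbit k = 1
      exfalso
      rw [show k = (k - 1) + 1 from by omega, orbit_succ,
          heavyInner_of_not_two_le int_N _ hN] at hk
      exact absurd hk (by norm_num)

theorem heavyLoop_iff (int_N int_y : Int) (hD : Dom_heavy int_y int_N)
    (hP : Pre_heavy int_y int_N) :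
    ∀ (fuel t : Nat), heavyBoundM int_N + 2 ≤ fuel + t →
      (∀ i1 i2 : Nat, i1 ≤ t → i2 ≤ t →
        orbit int_N int_y i1 = orbit int_N int_y i2 → i1 = i2) →
      (∀ i : Nat, 1 ≤ i → i ≤ t → orbit int_N int_y i ≠ 1) →
      (heavyLoop int_N fuel (orbit int_N int_y t)
          ((List.range (t + 1)).map (orbit int_N int_y)) = true ↔
        ∃ k, 1 ≤ k ∧ orbit int_N int_y k = 1) := by
  intro fuel
  induction fuel with
  | zero =>
      intro t hft hinj hne
      exfalso
      -- t distinct positive-index orbit values all lie in [0, 64(N-1)^2+1): t ≤ M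
      have hmaps : ∀ i ∈ Finset.Icc 1 t,
          orbit int_N int_y i ∈ Finset.Ico (0:Int) (64 * (int_N - 1) ^ 2 + 1) := by
        intro i hi
        simp only [Finset.mem_Icc] at hi
        obtain ⟨h0, hB⟩ := orbit_pos_bound int_N int_y hD hP (i - 1)
        rw [show i - 1 + 1 = i from by omega] at h0 hB
        simp only [Finset.mem_Ico]
        exact ⟨h0, hB⟩
      have hinjOn : Set.InjOn (orbit int_N int_y) (Finset.Icc 1 t) := by
        intro a ha b hb hab
        simp only [Finset.coe_Icc, Set.mem_Icc] at ha hb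
        exact hinj a b ha.2 hb.2 hab
      have hcard := Finset.card_le_card_of_injOn _ hmaps hinjOn
      rw [Int.card_Ico, Nat.card_Icc] at hcard
      simp only [heavyBoundM] at hft
      omega
  | succ fuel ih =>
      intro t hft hinj hne
      rw [heavyLoop]
      rw [← orbit_succ int_N int_y t]
      by_cases h1 : orbit int_N int_y (t + 1) = 1
      · rw [if_pos h1]
        exact iff_of_true rfl ⟨t + 1, by omega, h1⟩
      · rw [if_neg h1]
        by_cases hmem : orbit int_N int_y (t + 1) ∈
            (List.range (t + 1)).map (orbit int_N int_y)
        · rw [if_pos hmem]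
          apply iff_of_false (by simp)
          -- the orbit has closed a 1-free cycle: 1 never appears
          obtain ⟨i0, hi0r, hi0⟩ := List.mem_map.mp hmem
          have hi0t : i0 ≤ t := by
            have := List.mem_range.mp hi0r; omega
          -- every later orbit value equals some orbit value with index in [i0, t]
          have hev : ∀ d : Nat, ∃ i : Nat, i0 ≤ i ∧ i ≤ t ∧
              orbit int_N int_y (t + 1 + d) = orbit int_N int_y i := by
            intro d
            induction d with
            | zero => exact ⟨i0, le_refl _, hi0t, hi0.symm⟩
            | succ d ihd =>
                obtain ⟨i, hii0, hit, hieq⟩ := ihd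
                rcases Nat.lt_or_ge i t with h | h
                · exact ⟨i + 1, by omega, by omega, by
                    rw [show t + 1 + (d + 1) = (t + 1 + d) + 1 from by omega,
                        orbit_succ, hieq, ← orbit_succ]⟩
                · have hit' : i = t := by omega
                  refine ⟨i0, le_refl _, hi0t, ?_⟩
                  rw [show t + 1 + (d + 1) = (t + 1 + d) + 1 from by omega,
                      orbit_succ, hieq, hit', ← orbit_succ]
                  exact hi0.symm
          rintro ⟨k, hk1, hk⟩
          rcases Nat.lt_or_ge t k with hkt | hkt
          · -- k > t
            obtain ⟨i, hii0, hit, hieq⟩ := hev (k - t - 1)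
            rw [show t + 1 + (k - t - 1) = k from by omega] at hieq
            rcases Nat.eq_zero_or_pos i with hiz | hip
            · -- orbit i = 1 with i = 0 : int_y = 1
              subst hiz
              have hy1 : int_y = 1 := by rw [hieq] at hk; exact hk
              rcases hP with hN | hy0
              · have ho1 : orbit int_N int_y 1 = 1 := by
                  rw [orbit_succ, show orbit int_N int_y 0 = int_y from rfl, hy1,
                      heavyInner_one int_N hN]
                rcases Nat.eq_zero_or_pos t with htz | htp
                · subst htz; exact h1 ho1
                · exact hne 1 (le_refl _) htp ho1
              · omega
            · exact hne i hip hit (hieq ▸ hk)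
          · exact hne k hk1 hkt hk
        · rw [if_neg hmem]
          have hprev : (List.range (t + 1)).map (orbit int_N int_y) ++
              [orbit int_N int_y (t + 1)] =
              (List.range (t + 2)).map (orbit int_N int_y) := by
            conv_rhs => rw [show t + 2 = (t + 1) + 1 from rfl, List.range_succ]
            rw [List.map_append, List.map_singleton]
          rw [hprev]
          apply ih (t + 1) (by omega)
          · intro i1 i2 hi1 hi2 heq
            rcases Nat.lt_or_ge i1 (t + 1) with h1' | h1' <;>
              rcases Nat.lt_or_ge i2 (t + 1) with h2' | h2'
            · exact hinj i1 i2 (by omega) (by omega) heq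
            · exfalso
              have : i2 = t + 1 := by omega
              subst this
              exact hmem (List.mem_map.mpr ⟨i1, List.mem_range.mpr (by omega), heq⟩)
            · exfalso
              have : i1 = t + 1 := by omega
              subst this
              exact hmem (List.mem_map.mpr ⟨i2, List.mem_range.mpr (by omega), heq.symm⟩)
            · omega
          · intro i hi1 hit
            rcases Nat.lt_or_ge i (t + 1) with h' | h'
            · exact hne i hi1 (by omega)
            · rw [show i = t + 1 from by omega]
              exact h1

theorem heavy_iff (int_N int_y : Int) (hD : Dom_heavy int_y int_N)
    (hP : Pre_heavy int_y int_N) :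
    heavy int_y int_N = true ↔ ∃ k, 1 ≤ k ∧ orbit int_N int_y k = 1 := by
  have h := heavyLoop_iff int_N int_y hD hP (heavyBoundM int_N + 2) 0 (by omega)
    (by intro i1 i2 h1 h2 _; omega) (by intro i h1 h2; omega)
  simpa [heavy, show orbit int_N int_y 0 = int_y from rfl] using h

-- ===== VERDICT (by name: the statement is the Claim_ definition above) =====
theorem heavy_spec : Claim_equal_heavy := by
  intro int_y int_N hD hP
  unfold Spec_heavy
  have h12 : (heavy int_y int_N = true) ↔ (heavy_alt int_y int_N = true) :=
    (heavy_iff int_N int_y hD hP).trans (heavy_alt_iff int_N int_y hD hP).symm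
  cases hA : heavy int_y int_N <;> cases hB : heavy_alt int_y int_N <;> simp_all
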